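-- pv_equiv track=rewrite | github.com/aliyurtsevenn/Cytoscape_Input_Interaction_map | interactome_map_parameters.py | index_finder_for_AccessionID
-- ===== SOURCE A (Python) =====
-- def index_finder_for_AccessionID(Accession_ID,Accession_ID_c):
--     Unique_Acccession_controls=[]
--     ind_for_Accession_c=[]
--     count=0
--     for i in Accession_ID_c:
--         if i not in Accession_ID:
--             if i not in Unique_Acccession_controls:
--                 Unique_Acccession_controls.append(i)
--                 ind_for_Accession_c.append(count)
--         count=count+1
--
--     Unique_Acccession=[]
--     ind_for_Accession=[]
--     count2=0
--     for i in Accession_ID: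
--         if i not in Accession_ID_c:
--             if i not in Unique_Acccession:
--                 Unique_Acccession.append(i)
--                 ind_for_Accession.append(count2)
--         count2=count2+1
--
--
--     Mutual_Accession=[]
--     ind_mutual=[]
--     count3=0
--     for i in Accession_ID:
--         if i in Accession_ID_c:
--             if i not in Mutual_Accession:
--                 Mutual_Accession.append(i)
--                 ind_mutual.append(count3)
--         count3=count3+1
--
--     return ind_for_Accession,ind_for_Accession_c,ind_mutual,Unique_Acccession_controls,Unique_Acccession,Mutual_Accession
-- ===== SOURCE B (Python) =====
-- def index_finder_for_AccessionID(Accession_ID, Accession_ID_c):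
--     # Build first-occurrence index maps once, then derive all six outputs by
--     # filtering the maps' items; dict insertion order gives first-occurrence order.
--     first_a = {}
--     for idx, x in enumerate(Accession_ID):
--         first_a.setdefault(x, idx)
--     first_c = {}
--     for idx, x in enumerate(Accession_ID_c):
--         first_c.setdefault(x, idx)
--     uc = [(x, i) for x, i in first_c.items() if x not in first_a]
--     ua = [(x, i) for x, i in first_a.items() if x not in first_c]
--     mu = [(x, i) for x, i in first_a.items() if x in first_c]
--     return ([i for _, i in ua], [i for _, i in uc], [i for _, i in mu],
--             [x for x, _ in uc], [x for x, _ in ua], [x for x, _ in mu])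
-- ===== Notes on version B (the rewrite author's own statement) =====
-- stated objective: faster
-- what changed: Replaces A's three dedup-append scans (quadratic list membership against both the other list and the growing accumulator) with two first-occurrence index dictionaries built once via setdefault, from whose items all six outputs are derived by filtering on key membership in the other dict.
import Mathlib
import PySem

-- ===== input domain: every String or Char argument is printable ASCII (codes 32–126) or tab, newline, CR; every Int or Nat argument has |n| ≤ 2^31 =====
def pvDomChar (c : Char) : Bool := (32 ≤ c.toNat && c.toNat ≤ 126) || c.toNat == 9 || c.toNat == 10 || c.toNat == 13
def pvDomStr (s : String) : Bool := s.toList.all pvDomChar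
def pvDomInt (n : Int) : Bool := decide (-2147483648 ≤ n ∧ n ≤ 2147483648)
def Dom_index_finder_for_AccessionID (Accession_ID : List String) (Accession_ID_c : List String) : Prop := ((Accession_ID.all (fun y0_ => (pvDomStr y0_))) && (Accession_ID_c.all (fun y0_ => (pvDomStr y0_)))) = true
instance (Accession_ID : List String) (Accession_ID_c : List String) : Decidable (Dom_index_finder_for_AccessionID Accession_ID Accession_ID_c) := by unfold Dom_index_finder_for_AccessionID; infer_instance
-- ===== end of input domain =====

-- B builds first-occurrence index dictionaries once and derives all six outputs
-- by filtering the dicts' items, replacing A's three dedup-append scans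
-- (objective: faster — hash maps instead of quadratic list membership).

-- ===== PORT A =====
-- A's three loops, each: list-membership filter, first-occurrence dedup against
-- the accumulator list itself, explicit counter in the state.
def aStep1 (Accession_ID : List String) (st : List String × List Int × Int) (i : String) :
    List String × List Int × Int :=
  if i ∉ Accession_ID then
    if i ∉ st.1 then (st.1 ++ [i], st.2.1 ++ [st.2.2], st.2.2 + 1)
    else (st.1, st.2.1, st.2.2 + 1)
  else (st.1, st.2.1, st.2.2 + 1)

def aStep2 (Accession_ID_c : List String) (st : List String × List Int × Int) (i : String) :
    List String × List Int × Int :=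
  if i ∉ Accession_ID_c then
    if i ∉ st.1 then (st.1 ++ [i], st.2.1 ++ [st.2.2], st.2.2 + 1)
    else (st.1, st.2.1, st.2.2 + 1)
  else (st.1, st.2.1, st.2.2 + 1)

def aStep3 (Accession_ID_c : List String) (st : List String × List Int × Int) (i : String) :
    List String × List Int × Int :=
  if i ∈ Accession_ID_c then
    if i ∉ st.1 then (st.1 ++ [i], st.2.1 ++ [st.2.2], st.2.2 + 1)
    else (st.1, st.2.1, st.2.2 + 1)
  else (st.1, st.2.1, st.2.2 + 1)

def index_finder_for_AccessionID (Accession_ID : List String) (Accession_ID_c : List String) :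
    List Int × List Int × List Int × List String × List String × List String :=
  let r1 := Accession_ID_c.foldl (aStep1 Accession_ID) ([], [], 0)
  let r2 := Accession_ID.foldl (aStep2 Accession_ID_c) ([], [], 0)
  let r3 := Accession_ID.foldl (aStep3 Accession_ID_c) ([], [], 0)
  (r2.2.1, r1.2.1, r3.2.1, r1.1, r2.1, r3.1)

-- ===== PORT B =====
-- first_x = {}; for idx, x in enumerate(l): first_x.setdefault(x, idx)
def firstDict (l : List String) : PySem.Dict String Int :=
  (PySem.List.enumerate l).foldl (fun d q => d.setdefault q.2 q.1) PySem.Dict.empty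

def index_finder_for_AccessionID_alt (Accession_ID : List String) (Accession_ID_c : List String) :
    List Int × List Int × List Int × List String × List String × List String :=
  let fa := firstDict Accession_ID
  let fc := firstDict Accession_ID_c
  let uc := fc.items.filter (fun q => !(fa.contains q.1))
  let ua := fa.items.filter (fun q => !(fc.contains q.1))
  let mu := fa.items.filter (fun q => fc.contains q.1)
  (ua.map Prod.snd, uc.map Prod.snd, mu.map Prod.snd,
   uc.map Prod.fst, ua.map Prod.fst, mu.map Prod.fst)

-- ===== PRECONDITION & SPEC =====
def Spec_index_finder_for_AccessionID (Accession_ID : List String) (Accession_ID_c : List String) (out : List Int × List Int × List Int × List String × List String × List String) : Prop := out = index_finder_for_AccessionID_alt Accession_ID Accession_ID_c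
instance (Accession_ID : List String) (Accession_ID_c : List String) (out : List Int × List Int × List Int × List String × List String × List String) : Decidable (Spec_index_finder_for_AccessionID Accession_ID Accession_ID_c out) := by unfold Spec_index_finder_for_AccessionID; infer_instance

-- ===== CLAIM (what is proved, stated in full; the proofs are below) =====
def Claim_equal_index_finder_for_AccessionID : Prop := ∀ (Accession_ID : List String) (Accession_ID_c : List String), Dom_index_finder_for_AccessionID Accession_ID Accession_ID_c → Spec_index_finder_for_AccessionID Accession_ID Accession_ID_c (index_finder_for_AccessionID Accession_ID Accession_ID_c)

-- ===== LEMMAS AND PROOFS =====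

-- Generic shape of A's three loops, with the element-only filter as a parameter.
def gStep (p : String → Bool) (st : List String × List Int × Int) (i : String) :
    List String × List Int × Int :=
  if p i then
    if i ∉ st.1 then (st.1 ++ [i], st.2.1 ++ [st.2.2], st.2.2 + 1)
    else (st.1, st.2.1, st.2.2 + 1)
  else (st.1, st.2.1, st.2.2 + 1)

theorem aStep1_eq_g (ids : List String) :
    aStep1 ids = gStep (fun i => !decide (i ∈ ids)) := by
  funext st i; simp [aStep1, gStep]

theorem aStep2_eq_g (idc : List String) :
    aStep2 idc = gStep (fun i => !decide (i ∈ idc)) := by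
  funext st i; simp [aStep2, gStep]

theorem aStep3_eq_g (idc : List String) :
    aStep3 idc = gStep (fun i => decide (i ∈ idc)) := by
  funext st i; simp [aStep3, gStep]

-- The setdefault fold from B, started at any dict/counter.
def dLoop (l : List String) (c : Int) (d : PySem.Dict String Int) : PySem.Dict String Int :=
  (PySem.List.enumerate l c).foldl (fun d q => d.setdefault q.2 q.1) d

-- Invariant: A's loop state IS the p-filtered items of the growing first-index dict.
theorem gLoop_eq (p : String → Bool) (l : List String) (c : Int)
    (d : PySem.Dict String Int) (hn : d.keys.Nodup) :
    (l.foldl (gStep p)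
      ((d.items.filter (fun q => p q.1)).map Prod.fst,
       (d.items.filter (fun q => p q.1)).map Prod.snd, c)).1
      = ((dLoop l c d).items.filter (fun q => p q.1)).map Prod.fst ∧
    (l.foldl (gStep p)
      ((d.items.filter (fun q => p q.1)).map Prod.fst,
       (d.items.filter (fun q => p q.1)).map Prod.snd, c)).2.1
      = ((dLoop l c d).items.filter (fun q => p q.1)).map Prod.snd := by
  induction l generalizing c d with
  | nil => simp [dLoop, PySem.List.enumerate_nil]
  | cons x l ih =>
    have hdl : dLoop (x :: l) c d = dLoop l (c + 1) (d.setdefault x c) := by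
      simp [dLoop, PySem.List.enumerate_cons]
    rw [hdl]
    simp only [List.foldl_cons]
    by_cases hc : d.contains x = true
    · have hd1 : d.setdefault x c = d := PySem.Dict.setdefault_of_contains d c hc
      have hxk : x ∈ d.items.map Prod.fst := by
        have := (PySem.Dict.contains_iff_mem_keys d x).mp hc
        simpa [PySem.Dict.keys] using this
      have hstep : gStep p
          ((d.items.filter (fun q => p q.1)).map Prod.fst,
           (d.items.filter (fun q => p q.1)).map Prod.snd, c)
          x = ((d.items.filter (fun q => p q.1)).map Prod.fst,
               (d.items.filter (fun q => p q.1)).map Prod.snd, c + 1) := by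
        by_cases hp : p x = true
        · obtain ⟨q, hq, hq1⟩ := List.mem_map.mp hxk
          have hxu : x ∈ (d.items.filter (fun q => p q.1)).map Prod.fst := by
            refine List.mem_map.mpr ⟨q, List.mem_filter.mpr ⟨hq, ?_⟩, hq1⟩
            simpa [hq1] using hp
          simp [gStep, hp, hxu]
        · simp [gStep, hp]
      rw [hstep, hd1]
      exact ih (c + 1) d hn
    · have hc' : d.contains x = false := by simpa using hc
      have hd1 : d.setdefault x c = d.insert x c :=
        PySem.Dict.setdefault_of_not_contains d c hc'
      have hitems : (d.insert x c).items = d.items ++ [(x, c)] :=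
        PySem.Dict.items_insert_of_not_contains d c hc'
      have hn1 : (d.setdefault x c).keys.Nodup := by
        rw [hd1]; exact PySem.Dict.nodup_keys_insert d x c hn
      have hxnk : x ∉ d.items.map Prod.fst := by
        intro hmem
        have : d.contains x = true := (PySem.Dict.contains_iff_mem_keys d x).mpr
          (by simpa [PySem.Dict.keys] using hmem)
        simp [hc'] at this
      by_cases hp : p x = true
      · have hxu : x ∉ (d.items.filter (fun q => p q.1)).map Prod.fst := by
          intro hmem
          obtain ⟨q, hq, hq1⟩ := List.mem_map.mp hmem
          exact hxnk (List.mem_map.mpr ⟨q, (List.mem_filter.mp hq).1, hq1⟩)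
        have hstep : gStep p
            ((d.items.filter (fun q => p q.1)).map Prod.fst,
             (d.items.filter (fun q => p q.1)).map Prod.snd, c)
            x = (((d.setdefault x c).items.filter (fun q => p q.1)).map Prod.fst,
                 ((d.setdefault x c).items.filter (fun q => p q.1)).map Prod.snd, c + 1) := by
          simp [gStep, hp, hxu, hd1, hitems, List.filter_append]
        rw [hstep]
        exact ih (c + 1) (d.setdefault x c) hn1
      · have hstep : gStep p
            ((d.items.filter (fun q => p q.1)).map Prod.fst,
             (d.items.filter (fun q => p q.1)).map Prod.snd, c)
            x = (((d.setdefault x c).items.filter (fun q => p q.1)).map Prod.fst,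
                 ((d.setdefault x c).items.filter (fun q => p q.1)).map Prod.snd, c + 1) := by
          simp [gStep, hp, hd1, hitems, List.filter_append]
        rw [hstep]
        exact ih (c + 1) (d.setdefault x c) hn1

-- Membership in the first-index dict is membership in the list.
theorem contains_dLoop (l : List String) (c : Int) (d : PySem.Dict String Int) (x : String) :
    (dLoop l c d).contains x = (d.contains x || decide (x ∈ l)) := by
  induction l generalizing c d with
  | nil => simp [dLoop, PySem.List.enumerate_nil]
  | cons y l ih =>
    have hdl : dLoop (y :: l) c d = dLoop l (c + 1) (d.setdefault y c) := by
      simp [dLoop, PySem.List.enumerate_cons]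
    rw [hdl, ih]
    simp [PySem.Dict.contains_setdefault]
    by_cases hxy : x = y <;> simp [hxy, Bool.or_comm, Bool.or_left_comm]

theorem contains_firstDict (l : List String) (x : String) :
    (firstDict l).contains x = decide (x ∈ l) := by
  have : firstDict l = dLoop l 0 PySem.Dict.empty := rfl
  rw [this, contains_dLoop]
  simp

theorem gLoop_firstDict (p : String → Bool) (l : List String) :
    (l.foldl (gStep p) ([], [], 0)).1
      = ((firstDict l).items.filter (fun q => p q.1)).map Prod.fst ∧
    (l.foldl (gStep p) ([], [], 0)).2.1
      = ((firstDict l).items.filter (fun q => p q.1)).map Prod.snd := by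
  have h := gLoop_eq p l 0 PySem.Dict.empty (by simp)
  simpa [dLoop, firstDict] using h

-- ===== VERDICT (by name: the statement is the Claim_ definition above) =====
theorem index_finder_for_AccessionID_spec : Claim_equal_index_finder_for_AccessionID := by
  intro ids idc _
  unfold Spec_index_finder_for_AccessionID index_finder_for_AccessionID index_finder_for_AccessionID_alt
  have hp1 : (fun q : String × Int => !(firstDict ids).contains q.1)
      = (fun q : String × Int => !decide (q.1 ∈ ids)) := by
    funext q; rw [contains_firstDict]
  have hp2 : (fun q : String × Int => !(firstDict idc).contains q.1)
      = (fun q : String × Int => !decide (q.1 ∈ idc)) := by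
    funext q; rw [contains_firstDict]
  have hp3 : (fun q : String × Int => (firstDict idc).contains q.1)
      = (fun q : String × Int => decide (q.1 ∈ idc)) := by
    funext q; rw [contains_firstDict]
  have h1 := gLoop_firstDict (fun i => !decide (i ∈ ids)) idc
  have h2 := gLoop_firstDict (fun i => !decide (i ∈ idc)) ids
  have h3 := gLoop_firstDict (fun i => decide (i ∈ idc)) ids
  simp only [aStep1_eq_g, aStep2_eq_g, aStep3_eq_g, hp1, hp2, hp3]
  rw [h1.1, h1.2, h2.1, h2.2, h3.1, h3.2]
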